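-- pv_equiv track=rewrite | github.com/vsdrun/lc_public | graph/261_Graph_Valid_Tree.py | rewrite2
-- ===== SOURCE A (Python) =====
-- def rewrite2(n, edges):
--     """
--     :type n: int
--     :type edges: List[List[int]]
--     :rtype: bool
--     """
--
--     # check edges number
--     if n-1 != len(edges):
--         return False
--
--     # dfs graph and check circle
--
--     # build graph
--     from collections import defaultdict as dd
--
--     dmap = dd(list)
--
--     def uf(node):
--         while dmap[node]:
--             node = dmap[node][0]
--         return node
--
--     # 套路，動態由union find 長 graph
--     # 不要預先build graph
--     # Why? 因為為沒有方向性!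
--
--     def dfs(edge):
--         x, y = edge[0], edge[1]
--
--         x = uf(x)
--         y = uf(y)
--         if x == y:
--             return False
--
--         dmap[x] = [y]
--         return True
--
--     return all(map(dfs, edges))
-- ===== SOURCE B (Python) =====
-- def rewrite2(n, edges):
--     """
--     :type n: int
--     :type edges: List[List[int]]
--     :rtype: bool
--     """
--     if n - 1 != len(edges):
--         return False
--     # quick-find union-find: every node maps directly to its component
--     # representative; uniting an edge relabels the whole x-side component.
--     comp = {}     # node -> representative of its component
--     members = {}  # representative -> list of all nodes of its component
--     for e in edges:
--         x, y = e[0], e[1]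
--         rx = comp.get(x, x)
--         ry = comp.get(y, y)
--         if rx == ry:
--             return False
--         group = members.pop(rx, [rx])
--         for z in group:
--             comp[z] = ry
--         members[ry] = members.pop(ry, [ry]) + group
--     return True
-- ===== Notes on version B (the rewrite author's own statement) =====
-- stated objective: alternative
-- what changed: A unions edges with a quick-union forest (dmap parent pointers, walked to a root on every lookup); B is a quick-find union-find: a dict mapping every node directly to its component representative, with the whole x-side component eagerly relabelled on each union, so there is no chain walking at all.
-- outside the precondition, e.g. on rewrite2(3, [[0, 0], [1]]): A returns False, B returns False
import Mathlib
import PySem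

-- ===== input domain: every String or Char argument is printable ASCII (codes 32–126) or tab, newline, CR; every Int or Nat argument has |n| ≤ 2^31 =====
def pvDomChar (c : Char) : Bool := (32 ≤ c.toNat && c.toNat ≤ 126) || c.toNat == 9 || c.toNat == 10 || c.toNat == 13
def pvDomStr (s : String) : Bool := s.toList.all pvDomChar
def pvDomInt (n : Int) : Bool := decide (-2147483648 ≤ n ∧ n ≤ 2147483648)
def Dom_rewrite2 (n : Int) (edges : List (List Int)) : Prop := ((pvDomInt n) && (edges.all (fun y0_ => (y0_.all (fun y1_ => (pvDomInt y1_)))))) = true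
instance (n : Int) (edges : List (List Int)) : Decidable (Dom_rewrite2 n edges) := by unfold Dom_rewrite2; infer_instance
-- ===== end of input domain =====

-- B replaces A's pointer-chasing union-find (walk parent chains in dmap to a root) by a
-- quick-find structure (each node mapped directly to its component representative, the
-- x-side component eagerly relabelled on union); objective: alternative, not claimed faster.

-- ===== PORT A =====
-- dmap[node] ([] when absent, as defaultdict(list) reads); its head is the parent pointer
def pvParent (d : PySem.Dict Int (List Int)) (z : Int) : Option Int :=
  match PySem.Dict.getD d z [] with
  | [] => none
  | w :: _ => some w

-- `while dmap[node]: node = dmap[node][0]` — fuel-bounded only to be total; the caller's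
-- fuel (edges.length + 1) always exceeds the chain length, which the equivalence proof shows
def pvUf (f : Nat) (d : PySem.Dict Int (List Int)) (z : Int) : Int :=
  match f with
  | 0 => z
  | f + 1 =>
    match pvParent d z with
    | none => z
    | some w => pvUf f d w

-- `all(map(dfs, edges))`: lazy, stops at the first False; dfs mutates dmap
def pvRunA (F : Nat) (rem : List (List Int)) (d : PySem.Dict Int (List Int)) : Bool :=
  match rem with
  | [] => true
  | e :: rest =>
    let x := PySem.List.pyGetD e 0 0   -- e[0] (Pre_ guarantees it exists)
    let y := PySem.List.pyGetD e 1 0   -- e[1]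
    let rx := pvUf F d x
    let ry := pvUf F d y
    if rx = ry then false
    else pvRunA F rest (PySem.Dict.insert d rx [ry])

def rewrite2 (n : Int) (edges : List (List Int)) : Bool :=
  if n - 1 ≠ (edges.length : Int) then false
  else pvRunA (edges.length + 1) edges PySem.Dict.empty

-- ===== PORT B =====
def pvRunB (rem : List (List Int)) (comp : PySem.Dict Int Int)
    (members : PySem.Dict Int (List Int)) : Bool :=
  match rem with
  | [] => true
  | e :: rest =>
    let x := PySem.List.pyGetD e 0 0
    let y := PySem.List.pyGetD e 1 0
    let rx := PySem.Dict.getD comp x x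
    let ry := PySem.Dict.getD comp y y
    if rx = ry then false
    else
      let group := PySem.Dict.getD members rx [rx]      -- members.pop(rx, [rx])
      let members1 := PySem.Dict.erase members rx
      let comp' := group.foldl (fun c z => PySem.Dict.insert c z ry) comp
      let grpY := PySem.Dict.getD members1 ry [ry]      -- members.pop(ry, [ry])
      let members' := PySem.Dict.insert (PySem.Dict.erase members1 ry) ry (grpY ++ group)
      pvRunB rest comp' members'

def rewrite2_alt (n : Int) (edges : List (List Int)) : Bool :=
  if n - 1 ≠ (edges.length : Int) then false
  else pvRunB edges PySem.Dict.empty PySem.Dict.empty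

-- ===== PRECONDITION & SPEC =====
-- Pre_ excludes edge lists containing an edge with fewer than two endpoints while the edge
-- count matches n-1: A raises IndexError on reaching such an edge (and where an earlier
-- failing edge short-circuits before it, B returns A's same False anyway).
def Pre_rewrite2 (n : Int) (edges : List (List Int)) : Prop :=
  n - 1 ≠ (edges.length : Int) ∨ ∀ e ∈ edges, 2 ≤ e.length
instance (n : Int) (edges : List (List Int)) : Decidable (Pre_rewrite2 n edges) := by
  unfold Pre_rewrite2; infer_instance

def pvWitness_rewrite2 : Int × List (List Int) := (3, [[0, 1], [1, 2]])

def Spec_rewrite2 (n : Int) (edges : List (List Int)) (out : Bool) : Prop := out = rewrite2_alt n edges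
instance (n : Int) (edges : List (List Int)) (out : Bool) : Decidable (Spec_rewrite2 n edges out) := by unfold Spec_rewrite2; infer_instance

-- ===== CLAIM (what is proved, stated in full; the proofs are below) =====
def Claim_equal_rewrite2 : Prop := ∀ (n : Int) (edges : List (List Int)), Dom_rewrite2 n edges → Pre_rewrite2 n edges → Spec_rewrite2 n edges (rewrite2 n edges)

-- ===== LEMMAS AND PROOFS =====

theorem pv_get?_erase (d : PySem.Dict Int (List Int)) (k k' : Int) :
    (d.erase k).get? k' = if k' = k then none else d.get? k' := by
  split_ifs with h
  · subst h
    simp [PySem.Dict.get?, PySem.Dict.erase, List.find?_eq_none]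
  · have hfun : (fun (a : Int × List Int) => !decide (a.1 = k) && decide (a.1 = k'))
        = fun (p : Int × List Int) => p.1 == k' := by
      funext a
      by_cases ha : a.1 = k'
      · simp [ha, h]
      · simp [ha]
    simp only [PySem.Dict.get?, PySem.Dict.erase, List.find?_filter, Bool.not_eq_eq_eq_not,
      Bool.not_true, beq_eq_false_iff_ne, ne_eq, beq_iff_eq, Bool.decide_and, decide_not]
    rw [hfun]

theorem pv_parent_insert (d : PySem.Dict Int (List Int)) (rx ry z : Int) :
    pvParent (PySem.Dict.insert d rx [ry]) z = if z = rx then some ry else pvParent d z := by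
  simp only [pvParent, PySem.Dict.getD_insert]
  split_ifs <;> rfl

theorem pv_uf_root (d : PySem.Dict Int (List Int)) (z : Int) (h : pvParent d z = none) :
    ∀ f, pvUf f d z = z := by
  intro f
  cases f with
  | zero => rfl
  | succ f => simp [pvUf, h]

theorem pv_uf_add (d : PySem.Dict Int (List Int)) :
    ∀ (f g : Nat) (z : Int), pvUf (f + g) d z = pvUf g d (pvUf f d z) := by
  intro f
  induction f with
  | zero => intro g z; rw [Nat.zero_add]; rfl
  | succ f ih =>
    intro g z
    have hs : f + 1 + g = (f + g) + 1 := by omega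
    rw [hs]
    cases hp : pvParent d z with
    | none =>
      rw [pv_uf_root d z hp, pv_uf_root d z hp, pv_uf_root d z hp]
    | some w =>
      simp only [pvUf, hp]
      exact ih g w

-- f steps of fuel reach a root (a node with no parent pointer) from every node
def pvGood (d : PySem.Dict Int (List Int)) (f : Nat) : Prop :=
  ∀ z, pvParent d (pvUf f d z) = none

theorem pv_uf_stable (d : PySem.Dict Int (List Int)) (f F : Nat) (z : Int)
    (h : pvGood d f) (hfg : f ≤ F) : pvUf F d z = pvUf f d z := by
  obtain ⟨k, rfl⟩ := Nat.exists_eq_add_of_le hfg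
  rw [pv_uf_add d f k z, pv_uf_root d (pvUf f d z) (h z)]

-- the effect on representatives of the union dmap[rx] = [ry]
theorem pv_uf_update (d : PySem.Dict Int (List Int)) (rx ry : Int)
    (hrx : pvParent d rx = none) (hry : pvParent d ry = none) (hne : ry ≠ rx) :
    ∀ (f : Nat) (z : Int), pvParent d (pvUf f d z) = none →
      pvUf (f + 1) (PySem.Dict.insert d rx [ry]) z
        = (if pvUf f d z = rx then ry else pvUf f d z) := by
  intro f
  induction f with
  | zero =>
    intro z hz
    have hz' : pvParent d z = none := hz
    by_cases h : z = rx
    · subst h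
      have e1 : pvParent (PySem.Dict.insert d z [ry]) z = some ry := by
        rw [pv_parent_insert]; simp
      simp only [pvUf, e1]
      simp
    · have e1 : pvParent (PySem.Dict.insert d rx [ry]) z = none := by
        rw [pv_parent_insert, if_neg h]; exact hz'
      simp only [pvUf, e1, if_neg h]
  | succ f ih =>
    intro z hz
    cases hp : pvParent d z with
    | none =>
      have hfix : ∀ g, pvUf g d z = z := pv_uf_root d z hp
      rw [hfix (f + 1)]
      by_cases h : z = rx
      · subst h
        have e1 : pvParent (PySem.Dict.insert d z [ry]) z = some ry := by
          rw [pv_parent_insert]; simp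
        have e2 : pvParent (PySem.Dict.insert d z [ry]) ry = none := by
          rw [pv_parent_insert, if_neg hne]; exact hry
        have step : pvUf (f + 1 + 1) (PySem.Dict.insert d z [ry]) z
            = pvUf (f + 1) (PySem.Dict.insert d z [ry]) ry := by
          simp only [pvUf, e1]
        rw [step, pv_uf_root _ ry e2 (f + 1), if_pos rfl]
      · have e1 : pvParent (PySem.Dict.insert d rx [ry]) z = none := by
          rw [pv_parent_insert, if_neg h]; exact hp
        rw [pv_uf_root _ z e1 (f + 1 + 1), if_neg h]
    | some w =>
      have hzrx : z ≠ rx := by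
        intro h; rw [h, hrx] at hp; cases hp
      have e1 : pvParent (PySem.Dict.insert d rx [ry]) z = some w := by
        rw [pv_parent_insert, if_neg hzrx]; exact hp
      have hLHS : pvUf (f + 1 + 1) (PySem.Dict.insert d rx [ry]) z
          = pvUf (f + 1) (PySem.Dict.insert d rx [ry]) w := by
        simp only [pvUf, e1]
      have hA : pvUf (f + 1) d z = pvUf f d w := by
        simp only [pvUf, hp]
      rw [hLHS, hA]
      rw [hA] at hz
      exact ih w hz

theorem pv_good_update (d : PySem.Dict Int (List Int)) (rx ry : Int) (f : Nat)
    (hg : pvGood d f) (hrx : pvParent d rx = none) (hry : pvParent d ry = none)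
    (hne : ry ≠ rx) : pvGood (PySem.Dict.insert d rx [ry]) (f + 1) := by
  intro z
  rw [pv_uf_update d rx ry hrx hry hne f z (hg z)]
  by_cases h : pvUf f d z = rx
  · rw [if_pos h, pv_parent_insert, if_neg hne, hry]
  · rw [if_neg h, pv_parent_insert, if_neg h, hg z]

theorem pv_foldl_insert_const (v : Int) :
    ∀ (L : List Int) (c : PySem.Dict Int Int) (a : Int),
      (L.foldl (fun c z => PySem.Dict.insert c z v) c).getD a a
        = if a ∈ L then v else c.getD a a := by
  intro L
  induction L with
  | nil => intro c a; simp
  | cons h t ih =>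
    intro c a
    simp only [List.foldl_cons, ih, PySem.Dict.getD_insert, List.mem_cons]
    by_cases hat : a ∈ t
    · simp [hat]
    · by_cases hah : a = h <;> simp [hat, hah]

-- the main bisimulation: A's chain-walking state d and B's quick-find state (comp, members)
-- induce the same representative function, hence the runs return the same Bool
theorem pv_run_eq : ∀ (rem : List (List Int)) (d : PySem.Dict Int (List Int))
    (comp : PySem.Dict Int Int) (members : PySem.Dict Int (List Int)) (f F : Nat),
    f + rem.length ≤ F →
    pvGood d f →
    (∀ z, PySem.Dict.getD comp z z = pvUf f d z) →
    (∀ r L, PySem.Dict.get? members r = some L → ∀ z, (z ∈ L ↔ pvUf f d z = r)) →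
    (∀ r, PySem.Dict.get? members r = none → ∀ z, pvUf f d z = r → z = r) →
    pvRunA F rem d = pvRunB rem comp members := by
  intro rem
  induction rem with
  | nil => intro d comp members f F _ _ _ _ _; rfl
  | cons e rest ih =>
    intro d comp members f F hF hg h1 h2 h3
    simp only [pvRunA, pvRunB]
    have hfF : f ≤ F := le_trans (Nat.le_add_right _ _) hF
    rw [pv_uf_stable d f F (PySem.List.pyGetD e 0 0) hg hfF,
        pv_uf_stable d f F (PySem.List.pyGetD e 1 0) hg hfF,
        h1 (PySem.List.pyGetD e 0 0), h1 (PySem.List.pyGetD e 1 0)]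
    set rX := pvUf f d (PySem.List.pyGetD e 0 0) with hrXdef
    set rY := pvUf f d (PySem.List.pyGetD e 1 0) with hrYdef
    by_cases hxy : rX = rY
    · simp [hxy]
    · rw [if_neg hxy, if_neg hxy]
      have hrootX : pvParent d rX = none := hg (PySem.List.pyGetD e 0 0)
      have hrootY : pvParent d rY = none := hg (PySem.List.pyGetD e 1 0)
      have hfixX : ∀ g, pvUf g d rX = rX := pv_uf_root d rX hrootX
      have hfixY : ∀ g, pvUf g d rY = rY := pv_uf_root d rY hrootY
      have hneYX : rY ≠ rX := fun h => hxy h.symm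
      have hupd : ∀ z, pvUf (f + 1) (PySem.Dict.insert d rX [rY]) z
          = (if pvUf f d z = rX then rY else pvUf f d z) :=
        fun z => pv_uf_update d rX rY hrootX hrootY hneYX f z (hg z)
      -- the popped group is exactly the fiber of rX
      have hGrp : ∀ z, (z ∈ PySem.Dict.getD members rX [rX] ↔ pvUf f d z = rX) := by
        intro z
        rw [PySem.Dict.getD_eq_get?_getD]
        cases hm : PySem.Dict.get? members rX with
        | some L => simpa using h2 rX L hm z
        | none =>
          simp only [Option.getD_none, List.mem_singleton]
          exact ⟨fun h => h ▸ hfixX f, fun h => h3 rX hm z h⟩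
      have hmem1 : PySem.Dict.get? (PySem.Dict.erase members rX) rY
          = PySem.Dict.get? members rY := by
        rw [pv_get?_erase, if_neg hneYX]
      -- and the kept group the fiber of rY
      have hGrpY : ∀ z, (z ∈ PySem.Dict.getD (PySem.Dict.erase members rX) rY [rY]
          ↔ pvUf f d z = rY) := by
        intro z
        rw [PySem.Dict.getD_eq_get?_getD, hmem1]
        cases hm : PySem.Dict.get? members rY with
        | some L => simpa using h2 rY L hm z
        | none =>
          simp only [Option.getD_none, List.mem_singleton]
          exact ⟨fun h => h ▸ hfixY f, fun h => h3 rY hm z h⟩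
      apply ih _ _ _ (f + 1) F (by simp only [List.length_cons] at hF; omega)
      · exact pv_good_update d rX rY f hg hrootX hrootY hneYX
      · intro z
        rw [pv_foldl_insert_const rY _ comp z, hupd z]
        by_cases h : pvUf f d z = rX
        · rw [if_pos ((hGrp z).mpr h), if_pos h]
        · rw [if_neg (fun hm => h ((hGrp z).mp hm)), if_neg h, h1 z]
      · intro r L hr z
        rw [PySem.Dict.get?_insert] at hr
        rw [hupd z]
        by_cases hrY' : r = rY
        · subst hrY'
          rw [if_pos rfl] at hr
          cases hr
          simp only [List.mem_append]
          constructor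
          · rintro (hzy | hzx)
            · have hy := (hGrpY z).mp hzy
              rw [hy, if_neg hneYX]
            · rw [if_pos ((hGrp z).mp hzx)]
          · intro hz
            by_cases h : pvUf f d z = rX
            · exact Or.inr ((hGrp z).mpr h)
            · rw [if_neg h] at hz
              exact Or.inl ((hGrpY z).mpr hz)
        · rw [if_neg hrY'] at hr
          rw [pv_get?_erase, pv_get?_erase, if_neg hrY'] at hr
          by_cases hrX' : r = rX
          · rw [if_pos hrX'] at hr; cases hr
          · rw [if_neg hrX'] at hr
            rw [h2 r L hr z]
            by_cases h : pvUf f d z = rX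
            · rw [if_pos h]
              exact ⟨fun h' => absurd (h'.symm.trans h) hrX',
                     fun h' => absurd h'.symm hrY'⟩
            · rw [if_neg h]
      · intro r hr z hz
        rw [PySem.Dict.get?_insert] at hr
        rw [hupd z] at hz
        by_cases hrY' : r = rY
        · rw [if_pos hrY'] at hr; cases hr
        · rw [if_neg hrY'] at hr
          rw [pv_get?_erase, pv_get?_erase, if_neg hrY'] at hr
          by_cases hrX' : r = rX
          · subst hrX'
            by_cases h : pvUf f d z = rX
            · rw [if_pos h] at hz; exact absurd hz hneYX
            · rw [if_neg h] at hz; exact absurd hz h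
          · rw [if_neg hrX'] at hr
            by_cases h : pvUf f d z = rX
            · rw [if_pos h] at hz; exact absurd hz.symm hrY'
            · rw [if_neg h] at hz
              exact h3 r hr z hz

-- ===== VERDICT (by name: the statement is the Claim_ definition above) =====
theorem rewrite2_spec : Claim_equal_rewrite2 := by
  intro n edges _ _
  unfold Spec_rewrite2 rewrite2 rewrite2_alt
  by_cases hn : n - 1 ≠ (edges.length : Int)
  · rw [if_pos hn, if_pos hn]
  · rw [if_neg hn, if_neg hn]
    apply pv_run_eq edges PySem.Dict.empty PySem.Dict.empty PySem.Dict.empty 0 (edges.length + 1)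
    · omega
    · intro z; simp [pvParent, pvUf, PySem.Dict.getD_empty]
    · intro z; simp [pvUf, PySem.Dict.getD_empty]
    · intro r L hr; simp [PySem.Dict.get?_empty] at hr
    · intro r _ z hz; simpa [pvUf] using hz
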